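-- pv_equiv track=rewrite | github.com/henryperkins/mcprag | mcprag/auth/unified_auth_v2.py | _determine_tier_from_azure_roles
-- ===== SOURCE A (Python) =====
-- from typing import Optional, Dict, Any, Callable, Tuple
--
-- def _determine_tier_from_azure_roles(claims: Dict[str, Any]) -> str:
--     """Determine user tier from Azure AD roles/groups."""
--     roles = claims.get("roles", [])
--
--     # Map Azure roles to MCP tiers
--     if any(role in ["Owner", "Contributor", "Search Service Contributor"] for role in roles):
--         return "admin"
--     elif any(role in ["Search Index Data Contributor"] for role in roles):
--         return "developer"
--     elif any(role in ["Search Index Data Reader", "Reader"] for role in roles):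
--         return "public"
--
--     return "public"
-- ===== SOURCE B (Python) =====
-- _ROLE_TIER = {
--     "Owner": "admin",
--     "Contributor": "admin",
--     "Search Service Contributor": "admin",
--     "Search Index Data Contributor": "developer",
--     "Search Index Data Reader": "public",
--     "Reader": "public",
-- }
-- _PRIORITY = {"public": 0, "developer": 1, "admin": 2}
-- _TIER_BY_RANK = ("public", "developer", "admin")
--
-- def _determine_tier_from_azure_roles(claims):
--     """Determine user tier from Azure AD roles/groups."""
--     roles = claims.get("roles", [])
--     rank = 0
--     for role in roles:
--         tier = _ROLE_TIER.get(role)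
--         if tier is not None:
--             rank = max(rank, _PRIORITY[tier])
--     return _TIER_BY_RANK[rank]
-- ===== Notes on version B (the rewrite author's own statement) =====
-- stated objective: idiomatic
-- what changed: Replaced the three priority-ordered any(...) scans over roles with a static role-to-tier table and one fold over roles keeping the highest-priority tier found.
import Mathlib
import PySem

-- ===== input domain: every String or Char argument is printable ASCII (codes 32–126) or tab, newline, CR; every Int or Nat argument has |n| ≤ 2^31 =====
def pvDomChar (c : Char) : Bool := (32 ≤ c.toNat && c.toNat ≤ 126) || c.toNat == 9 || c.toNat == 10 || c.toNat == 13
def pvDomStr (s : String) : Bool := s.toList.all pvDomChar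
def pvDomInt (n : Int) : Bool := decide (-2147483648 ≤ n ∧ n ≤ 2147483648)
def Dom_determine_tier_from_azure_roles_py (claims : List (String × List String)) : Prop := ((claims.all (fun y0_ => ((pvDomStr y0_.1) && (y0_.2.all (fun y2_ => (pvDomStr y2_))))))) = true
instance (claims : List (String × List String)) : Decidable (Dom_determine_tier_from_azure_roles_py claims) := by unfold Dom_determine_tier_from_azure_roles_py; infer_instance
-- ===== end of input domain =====

-- B replaces A's three priority-ordered any(...) scans with a static role→tier table and one
-- max-priority fold over the roles (objective: idiomatic; same return value everywhere).

-- ===== PORT A =====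
def determine_tier_from_azure_roles_py (claims : List (String × List String)) : String :=
  let roles := PySem.Dict.getD (PySem.Dict.mk claims) "roles" []
  if roles.any (fun role => role ∈ ["Owner", "Contributor", "Search Service Contributor"]) then
    "admin"
  else if roles.any (fun role => role ∈ ["Search Index Data Contributor"]) then
    "developer"
  else if roles.any (fun role => role ∈ ["Search Index Data Reader", "Reader"]) then
    "public"
  else
    "public"

-- ===== PORT B =====
def pvRoleTier : PySem.Dict String String := PySem.Dict.mk
  [("Owner", "admin"), ("Contributor", "admin"), ("Search Service Contributor", "admin"),
   ("Search Index Data Contributor", "developer"),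
   ("Search Index Data Reader", "public"), ("Reader", "public")]

def pvPriority : PySem.Dict String Nat := PySem.Dict.mk
  [("public", 0), ("developer", 1), ("admin", 2)]

-- hand port of `_PRIORITY[tier]` as getD with 0: exact, every value of _ROLE_TIER is a key of _PRIORITY
def determine_tier_from_azure_roles_py_alt (claims : List (String × List String)) : String :=
  let roles := PySem.Dict.getD (PySem.Dict.mk claims) "roles" []
  let rank := roles.foldl (fun r role =>
    match PySem.Dict.get? pvRoleTier role with
    | some tier => max r (PySem.Dict.getD pvPriority tier 0)
    | none => r) 0
  -- _TIER_BY_RANK[rank]; rank is always 0, 1 or 2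
  match rank with
  | 0 => "public"
  | 1 => "developer"
  | _ => "admin"

-- ===== PRECONDITION & SPEC =====
def Spec_determine_tier_from_azure_roles_py (claims : List (String × List String)) (out : String) : Prop := out = determine_tier_from_azure_roles_py_alt claims
instance (claims : List (String × List String)) (out : String) : Decidable (Spec_determine_tier_from_azure_roles_py claims out) := by unfold Spec_determine_tier_from_azure_roles_py; infer_instance

-- ===== CLAIM (what is proved, stated in full; the proofs are below) =====
def Claim_equal_determine_tier_from_azure_roles_py : Prop := ∀ (claims : List (String × List String)), Dom_determine_tier_from_azure_roles_py claims → Spec_determine_tier_from_azure_roles_py claims (determine_tier_from_azure_roles_py claims)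

-- ===== LEMMAS AND PROOFS =====

def pvStep (r : Nat) (role : String) : Nat :=
  match PySem.Dict.get? pvRoleTier role with
  | some tier => max r (PySem.Dict.getD pvPriority tier 0)
  | none => r

def pvRankVal (role : String) : Nat :=
  if role ∈ ["Owner", "Contributor", "Search Service Contributor"] then 2
  else if role = "Search Index Data Contributor" then 1
  else 0

def pvRankOf (rs : List String) : Nat :=
  if rs.any (fun role => role ∈ ["Owner", "Contributor", "Search Service Contributor"]) then 2
  else if rs.any (fun role => role ∈ ["Search Index Data Contributor"]) then 1
  else 0

theorem pvRankOf_cons (r : String) (tl : List String) :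
    pvRankOf (r :: tl) = max (pvRankVal r) (pvRankOf tl) := by
  unfold pvRankOf pvRankVal
  by_cases hA : r ∈ ["Owner", "Contributor", "Search Service Contributor"] <;>
  by_cases hD : r = "Search Index Data Contributor" <;>
  by_cases hTA : tl.any (fun role => role ∈ ["Owner", "Contributor", "Search Service Contributor"]) = true <;>
  by_cases hTD : tl.any (fun role => role ∈ ["Search Index Data Contributor"]) = true <;>
  simp_all [List.any_cons] <;> split_ifs <;> first | rfl | omega

theorem pvStep_eq (r : Nat) (role : String) : pvStep r role = max r (pvRankVal role) := by
  by_cases h1 : role = "Owner" <;>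
  by_cases h2 : role = "Contributor" <;>
  by_cases h3 : role = "Search Service Contributor" <;>
  by_cases h4 : role = "Search Index Data Contributor" <;>
  by_cases h5 : role = "Search Index Data Reader" <;>
  by_cases h6 : role = "Reader" <;>
  first
  | (subst_vars; rfl)
  | (have g1 : ("Owner" : String) ≠ role := fun h => h1 h.symm
     have g2 : ("Contributor" : String) ≠ role := fun h => h2 h.symm
     have g3 : ("Search Service Contributor" : String) ≠ role := fun h => h3 h.symm
     have g4 : ("Search Index Data Contributor" : String) ≠ role := fun h => h4 h.symm
     have g5 : ("Search Index Data Reader" : String) ≠ role := fun h => h5 h.symm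
     have g6 : ("Reader" : String) ≠ role := fun h => h6 h.symm
     have b1 : (("Owner" : String) == role) = false := beq_eq_false_iff_ne.mpr g1
     have b2 : (("Contributor" : String) == role) = false := beq_eq_false_iff_ne.mpr g2
     have b3 : (("Search Service Contributor" : String) == role) = false := beq_eq_false_iff_ne.mpr g3
     have b4 : (("Search Index Data Contributor" : String) == role) = false := beq_eq_false_iff_ne.mpr g4
     have b5 : (("Search Index Data Reader" : String) == role) = false := beq_eq_false_iff_ne.mpr g5
     have b6 : (("Reader" : String) == role) = false := beq_eq_false_iff_ne.mpr g6
     simp [pvStep, pvRankVal, pvRoleTier, PySem.Dict.get?,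
       List.find?, b1, b2, b3, b4, b5, b6, h1, h2, h3, h4])

theorem pvFold_eq (rs : List String) : ∀ acc : Nat,
    rs.foldl pvStep acc = max acc (pvRankOf rs) := by
  induction rs with
  | nil => intro acc; simp [pvRankOf]
  | cons r tl ih =>
    intro acc
    have hstep := pvStep_eq acc r
    simp only [List.foldl_cons, ih, hstep]
    rw [pvRankOf_cons]
    omega

theorem determine_tier_eq (claims : List (String × List String)) :
    determine_tier_from_azure_roles_py claims = determine_tier_from_azure_roles_py_alt claims := by
  unfold determine_tier_from_azure_roles_py determine_tier_from_azure_roles_py_alt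
  have hfold : ∀ rs : List String,
      rs.foldl (fun r role =>
        match PySem.Dict.get? pvRoleTier role with
        | some tier => max r (PySem.Dict.getD pvPriority tier 0)
        | none => r) 0 = pvRankOf rs := by
    intro rs
    have := pvFold_eq rs 0
    simpa [pvStep] using this
  simp only [hfold]
  set rs := PySem.Dict.getD (PySem.Dict.mk claims) "roles" [] with hrs
  unfold pvRankOf
  split_ifs <;> simp_all

-- ===== VERDICT (by name: the statement is the Claim_ definition above) =====
theorem determine_tier_from_azure_roles_py_spec : Claim_equal_determine_tier_from_azure_roles_py := by
  intro claims _
  exact determine_tier_eq claims
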